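-- pv_equiv track=rewrite | github.com/MarcDasilva/HackIllinois | block_copy/veildoc.py | _inject_zero_width
-- ===== SOURCE A (Python) =====
-- ZERO_WIDTH_CHARS = [
--     '\u200B',  # Zero Width Space
--     '\u200C',  # Zero Width Non-Joiner
--     '\uFEFF',  # Zero Width No-Break Space
-- ]
--
-- def _inject_zero_width(text):
--     """Layer 2: Inject zero-width characters every 2-3 characters."""
--     result = []
--     zwc_index = 0
--
--     for i, char in enumerate(text):
--         result.append(char)
--         # Inject after every 2-3 characters (alternating pattern)
--         if (i + 1) % (2 + (i % 2)) == 0 and i < len(text) - 1: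
--             result.append(ZERO_WIDTH_CHARS[zwc_index % len(ZERO_WIDTH_CHARS)])
--             zwc_index += 1
--
--     return ''.join(result)
-- ===== SOURCE B (Python) =====
-- ZERO_WIDTH_CHARS = [
--     '\u200B',  # Zero Width Space
--     '\u200C',  # Zero Width Non-Joiner
--     '\uFEFF',  # Zero Width No-Break Space
-- ]
--
-- def _inject_zero_width(text):
--     """Layer 2: A's alternating 2/3 condition fires exactly after every 6th
--     character (never at the end), so: peel 6-character chunks off the front,
--     joining them with the cycling zero-width separators."""
--     parts = []
--     k = 0
--     while len(text) > 6:
--         parts.append(text[:6])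
--         parts.append(ZERO_WIDTH_CHARS[k % len(ZERO_WIDTH_CHARS)])
--         text = text[6:]
--         k += 1
--     parts.append(text)
--     return ''.join(parts)
-- ===== Notes on version B (the rewrite author's own statement) =====
-- stated objective: simpler
-- what changed: A's per-character loop with the alternating (i+1)%(2+(i%2)) test and a running zwc counter is replaced by peeling 6-character chunks off the front of the text and joining them with the cycling zero-width separators (the obscure modulus condition fires exactly after every 6th character, never at the end).
import Mathlib
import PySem

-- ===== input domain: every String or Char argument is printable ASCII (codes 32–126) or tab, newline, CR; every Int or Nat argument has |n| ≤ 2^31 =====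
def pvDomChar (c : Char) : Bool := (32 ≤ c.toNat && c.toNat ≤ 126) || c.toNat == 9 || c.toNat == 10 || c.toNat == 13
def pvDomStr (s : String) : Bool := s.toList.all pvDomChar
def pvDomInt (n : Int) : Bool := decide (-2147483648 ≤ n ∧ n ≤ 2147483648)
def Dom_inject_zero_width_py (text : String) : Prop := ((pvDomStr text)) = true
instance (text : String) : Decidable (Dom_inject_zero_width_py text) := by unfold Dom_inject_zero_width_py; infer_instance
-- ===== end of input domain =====

-- B replaces A's per-character loop with its alternating-modulus test by peeling
-- 6-character chunks joined with the cycling zero-width separators (objective: simpler).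

-- ZERO_WIDTH_CHARS (module constant, shared by both programs)
def pvZWC : List Char := ['\u200B', '\u200C', '\uFEFF']

-- ZERO_WIDTH_CHARS[k % len(ZERO_WIDTH_CHARS)]  (index is always in range, so getD's default is never used)
def pvZwcAt (k : Int) : Char := (PySem.List.pyGet? pvZWC (PySem.Int.mod k 3)).getD ' '

-- ===== PORT A =====
-- the for-loop over enumerate(text) as structural recursion over the same state (result, zwc_index), i the running index
def pvAGo (n : Int) (l : List Char) (i : Int) (z : Int) (acc : List Char) : List Char :=
  match l with
  | [] => acc
  | c :: rest =>
    if PySem.Int.mod (i + 1) (2 + PySem.Int.mod i 2) = 0 ∧ i < n - 1 then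
      pvAGo n rest (i + 1) (z + 1) (acc ++ [c] ++ [pvZwcAt z])
    else
      pvAGo n rest (i + 1) z (acc ++ [c])

def inject_zero_width_py (text : String) : String :=
  String.ofList (pvAGo (text.toList.length : Int) text.toList 0 0 [])

-- ===== PORT B =====
-- Source B's while-loop: text[:6] / text[6:] are nonnegative-bound slices = take 6 / drop 6 (exact)
def pvBGo (l : List Char) (k : Int) (parts : List Char) : List Char :=
  if 6 < l.length then
    pvBGo (l.drop 6) (k + 1) (parts ++ l.take 6 ++ [pvZwcAt k])
  else
    parts ++ l
termination_by l.length
decreasing_by simp; omega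

def inject_zero_width_py_alt (text : String) : String :=
  String.ofList (pvBGo text.toList 0 [])

-- ===== PRECONDITION & SPEC =====
def Spec_inject_zero_width_py (text : String) (out : String) : Prop := out = inject_zero_width_py_alt text
instance (text : String) (out : String) : Decidable (Spec_inject_zero_width_py text out) := by unfold Spec_inject_zero_width_py; infer_instance

-- ===== CLAIM (what is proved, stated in full; the proofs are below) =====
def Claim_equal_inject_zero_width_py : Prop := ∀ (text : String), Dom_inject_zero_width_py text → Spec_inject_zero_width_py text (inject_zero_width_py text)

-- ===== LEMMAS AND PROOFS =====

-- A's alternating-modulus test is exactly "the 1-based position is a multiple of 6"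
theorem pv_cond_iff (i : Int) (_h0 : 0 ≤ i) :
    (PySem.Int.mod (i + 1) (2 + PySem.Int.mod i 2) = 0) ↔ (i + 1) % 6 = 0 := by
  rw [PySem.Int.mod_eq_emod_of_pos (b := 2) (by omega)]
  rcases Int.emod_two_eq i with h | h <;> rw [h] <;>
    rw [PySem.Int.mod_eq_emod_of_pos (by omega)] <;> omega

theorem pvAGo_cons_neg (n : Int) (c : Char) (rest : List Char) (i z : Int) (acc : List Char)
    (h0 : 0 ≤ i) (h : ¬((i + 1) % 6 = 0 ∧ i < n - 1)) :
    pvAGo n (c :: rest) i z acc = pvAGo n rest (i + 1) z (acc ++ [c]) := by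
  rw [pvAGo, if_neg]
  rw [pv_cond_iff i h0]; exact h

theorem pvAGo_cons_pos (n : Int) (c : Char) (rest : List Char) (i z : Int) (acc : List Char)
    (h0 : 0 ≤ i) (h : (i + 1) % 6 = 0 ∧ i < n - 1) :
    pvAGo n (c :: rest) i z acc = pvAGo n rest (i + 1) (z + 1) (acc ++ [c] ++ [pvZwcAt z]) := by
  rw [pvAGo, if_pos]
  rw [pv_cond_iff i h0]; exact h

-- tail of a block: fewer than 6 characters remain to the next multiple of 6, no separator is inserted
theorem pvAGo_tail (l : List Char) : ∀ (n i z : Int) (acc : List Char),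
    0 ≤ i → i + (l.length : Int) = n → i % 6 + (l.length : Int) ≤ 6 →
    pvAGo n l i z acc = acc ++ l := by
  induction l with
  | nil => intro n i z acc _ _ _; simp [pvAGo]
  | cons c rest ih =>
    intro n i z acc h0 hn hb
    simp only [List.length_cons] at hn hb
    rw [pvAGo_cons_neg n c rest i z acc h0 (by push_cast at hn hb ⊢; omega)]
    rw [ih n (i + 1) z (acc ++ [c]) (by omega) (by push_cast at hn ⊢; omega)
        (by push_cast at hb ⊢; omega)]
    simp

-- main invariant: at a block boundary (i = 6·z) A's loop agrees with B's chunk-peeling loop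
theorem pv_main (m : Nat) : ∀ (l : List Char) (z : Int) (acc : List Char) (n : Int),
    l.length ≤ m → 0 ≤ z → 6 * z + (l.length : Int) = n →
    pvAGo n l (6 * z) z acc = pvBGo l z acc := by
  induction m with
  | zero =>
    intro l z acc n hm hz hn
    have : l = [] := List.eq_nil_of_length_eq_zero (by omega)
    subst this
    simp [pvAGo, pvBGo]
  | succ m ih =>
    intro l z acc n hm hz hn
    by_cases h6 : 6 < l.length
    · rcases l with _ | ⟨a, _ | ⟨b, _ | ⟨c, _ | ⟨d, _ | ⟨e, _ | ⟨f, rest⟩⟩⟩⟩⟩⟩ <;>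
        simp only [List.length_cons, List.length_nil] at h6 hm hn <;> try omega
      push_cast at hn
      have hr : 1 ≤ rest.length := by omega
      rw [pvAGo_cons_neg _ _ _ _ _ _ (by omega) (by omega)]
      rw [pvAGo_cons_neg _ _ _ _ _ _ (by omega) (by omega)]
      rw [pvAGo_cons_neg _ _ _ _ _ _ (by omega) (by omega)]
      rw [pvAGo_cons_neg _ _ _ _ _ _ (by omega) (by omega)]
      rw [pvAGo_cons_neg _ _ _ _ _ _ (by omega) (by omega)]
      rw [pvAGo_cons_pos _ _ _ _ _ _ (by omega) (by constructor <;> omega)]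
      have h65 : 6 * z + 1 + 1 + 1 + 1 + 1 + 1 = 6 * (z + 1) := by ring
      rw [h65]
      rw [ih rest (z + 1) _ n (by omega) (by omega) (by omega)]
      conv_rhs => rw [pvBGo]
      rw [if_pos (show 6 < (a :: b :: c :: d :: e :: f :: rest).length by simp; omega)]
      simp
    · rw [pvBGo, if_neg h6]
      exact pvAGo_tail l n (6 * z) z acc (by omega) hn (by omega)

-- ===== VERDICT (by name: the statement is the Claim_ definition above) =====
theorem inject_zero_width_py_spec : Claim_equal_inject_zero_width_py := by
  intro text _
  unfold Spec_inject_zero_width_py inject_zero_width_py inject_zero_width_py_alt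
  have := pv_main text.toList.length text.toList 0 [] (text.toList.length : Int)
    (le_refl _) (le_refl 0) (by simp)
  simp only [mul_zero] at this
  rw [this]
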